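-- pv_equiv track=rewrite | github.com/hanjinliu/magic-class | magicclass/widgets/codeedit.py | _get_indents
-- ===== SOURCE A (Python) =====
-- _TAB = " " * 4
--
-- def _get_indents(text: str) -> int:
--     chars = []
--     for c in text:
--         if c == " ":
--             chars.append(" ")
--         elif c == "\t":
--             chars.append(_TAB)
--         else:
--             break
--     return "".join(chars)
-- ===== SOURCE B (Python) =====
-- _TAB = " " * 4
--
-- def _get_indents(text: str) -> int:
--     stripped = text.lstrip(" \t")
--     indent = text[: len(text) - len(stripped)]
--     return indent.replace("\t", _TAB)
-- ===== Notes on version B (the rewrite author's own statement) =====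
-- stated objective: idiomatic
-- what changed: Replaces the char-by-char loop with list accumulator and join by a two-stage decomposition: strip the leading space/tab characters to slice off the indent prefix, then expand tabs with a single replace pass.
import Mathlib
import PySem

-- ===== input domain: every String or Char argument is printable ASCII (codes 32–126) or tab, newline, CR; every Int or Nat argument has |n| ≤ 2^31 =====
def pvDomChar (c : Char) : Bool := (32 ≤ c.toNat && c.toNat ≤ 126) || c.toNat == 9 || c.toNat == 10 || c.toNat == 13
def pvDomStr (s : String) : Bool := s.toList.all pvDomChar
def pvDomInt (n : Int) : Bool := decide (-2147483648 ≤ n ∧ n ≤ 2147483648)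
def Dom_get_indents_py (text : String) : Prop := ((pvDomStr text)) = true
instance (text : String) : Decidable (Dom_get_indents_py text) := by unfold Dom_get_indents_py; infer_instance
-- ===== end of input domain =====

-- B replaces A's char-by-char accumulator loop with lstrip-based prefix slicing plus one replace pass (idiomatic; same return value).

-- ===== PORT A =====
-- the for-loop with break, accumulating the list `chars` of string pieces
def getIndentsLoop : List Char → List String
  | [] => []
  | c :: rest =>
    if c == ' ' then " " :: getIndentsLoop rest
    else if c == '\t' then "    " :: getIndentsLoop rest
    else []

def get_indents_py (text : String) : String :=
  PySem.Str.join "" (getIndentsLoop text.toList)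

-- ===== PORT B =====
def get_indents_py_alt (text : String) : String :=
  -- text.lstrip(" \t"): PySem has no left-only stripChars, so the exact hand port:
  -- drop leading characters contained in " \t"
  let stripped : List Char := text.toList.dropWhile (fun c => c == ' ' || c == '\t')
  -- text[: len(text) - len(stripped)]
  let indent : List Char :=
    PySem.List.slice text.toList none (some ((text.toList.length - stripped.length : Nat) : Int))
  -- indent.replace("\t", _TAB)
  PySem.Str.replace (String.ofList indent) "\t" "    "

-- ===== PRECONDITION & SPEC =====
def Spec_get_indents_py (text : String) (out : String) : Prop := out = get_indents_py_alt text
instance (text : String) (out : String) : Decidable (Spec_get_indents_py text out) := by unfold Spec_get_indents_py; infer_instance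

-- ===== CLAIM (what is proved, stated in full; the proofs are below) =====
def Claim_equal_get_indents_py : Prop := ∀ (text : String), Dom_get_indents_py text → Spec_get_indents_py text (get_indents_py text)

-- ===== LEMMAS AND PROOFS =====

-- joining with the empty separator is concatenation
theorem join_nil_eq_flatten (parts : List (List Char)) :
    PySem.Chars.join [] parts = parts.flatten := by
  induction parts with
  | nil => simp [PySem.Chars.join_nil]
  | cons p rest ih =>
    cases rest with
    | nil => simp [PySem.Chars.join_singleton]
    | cons q rest' =>
      rw [PySem.Chars.join_cons_cons]
      simp at ih ⊢
      simpa using ih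

-- A's joined accumulator, characterised as a flatMap over the takeWhile prefix
theorem loop_flatten (l : List Char) :
    ((getIndentsLoop l).map String.toList).flatten =
      (l.takeWhile (fun c => c == ' ' || c == '\t')).flatMap
        (fun c => if c == '\t' then "    ".toList else [c]) := by
  induction l with
  | nil => simp [getIndentsLoop]
  | cons c rest ih =>
    by_cases hs : c = ' '
    · subst hs; simp [getIndentsLoop, ih]
    · by_cases ht : c = '\t'
      · subst ht; simp [getIndentsLoop, ih]
      · simp [getIndentsLoop, hs, ht]

-- replace with a single-character (nonempty) needle, on the fuel-based go
theorem replace_go_single (o : Char) (new : List Char) :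
    ∀ (s acc : List Char) (fuel : Nat), s.length ≤ fuel →
      PySem.Chars.replace.go [o] new fuel s acc =
        acc.reverse ++ s.flatMap (fun c => if c == o then new else [c]) := by
  intro s
  induction s with
  | nil =>
    intro acc fuel _
    cases fuel <;> simp [PySem.Chars.replace.go]
  | cons c t ih =>
    intro acc fuel hf
    cases fuel with
    | zero => simp at hf
    | succ n =>
      simp only [PySem.Chars.replace.go]
      by_cases h : c = o
      · subst h
        have hp : List.isPrefixOf [c] (c :: t) = true := by
          simp [List.isPrefixOf]
        rw [if_pos hp]
        have hd : List.drop [c].length (c :: t) = t := rfl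
        rw [hd]
        simp only [List.length_cons] at hf
        rw [ih (new.reverse ++ acc) n (by omega)]
        simp
      · have hp : List.isPrefixOf [o] (c :: t) = false := by
          simp [List.isPrefixOf]; exact fun hco => h hco.symm
        rw [if_neg (by simp [hp])]
        simp only [List.length_cons] at hf
        rw [ih (c :: acc) n (by omega)]
        simp [h]

theorem replace_single (s : List Char) (o : Char) (new : List Char) :
    PySem.Chars.replace s [o] new =
      s.flatMap (fun c => if c == o then new else [c]) := by
  unfold PySem.Chars.replace
  rw [if_neg (by simp)]
  simpa using replace_go_single o new s [] s.length le_rfl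

-- the slice in B is exactly the takeWhile prefix
theorem slice_eq_takeWhile (l : List Char) (p : Char → Bool) :
    PySem.List.slice l none (some ((l.length - (l.dropWhile p).length : Nat) : Int)) =
      l.takeWhile p := by
  rw [PySem.List.slice_to l (by positivity)]
  have h := congrArg List.length (List.takeWhile_append_dropWhile (p := p) (l := l))
  simp only [List.length_append] at h
  have hlen : l.length - (l.dropWhile p).length = (l.takeWhile p).length := by omega
  rw [Int.toNat_natCast, hlen]
  exact (List.prefix_iff_eq_take.mp (List.takeWhile_prefix p)).symm

-- ===== VERDICT (by name: the statement is the Claim_ definition above) =====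
theorem get_indents_py_spec : Claim_equal_get_indents_py := by
  intro text _
  unfold Spec_get_indents_py
  apply String.toList_inj.mp
  unfold get_indents_py get_indents_py_alt
  rw [PySem.Str.toList_join, PySem.Str.toList_replace]
  have h0 : ("".toList : List Char) = [] := rfl
  have h1 : ("\t".toList : List Char) = ['\t'] := rfl
  rw [h0, h1]
  rw [join_nil_eq_flatten, loop_flatten]
  rw [slice_eq_takeWhile text.toList (fun c => c == ' ' || c == '\t')]
  have : (String.ofList (text.toList.takeWhile (fun c => c == ' ' || c == '\t'))).toList
      = text.toList.takeWhile (fun c => c == ' ' || c == '\t') := by simp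
  rw [this, replace_single]
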